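-- pv_equiv track=rewrite | github.com/nanjiangshu/TMplot | src/drawMSATopo.py | GetPositionIdenticalAdjacentNumber
-- ===== SOURCE A (Python) =====
-- def GetPositionIdenticalAdjacentNumber(lst, start, minLength): #{{{
-- # given a list of numbers
-- # e.g.
-- # [ 1, 1, 0, 4,3, 4,2,3,3,3,54, 4,3, 44,44,44,44,3,3,3,3]
-- # get the position of identical adjacent numbers with at least minLength
--     posList = []
--     N = len(lst)
--     if N  <= 0 :
--         return posList
--     i = 0
-- #     print 'N=', N
--     while i < N:
--         j = 0
--         while i+j < N and lst[i+j] == lst[i]: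
--             j += 1
--         if j > 0:
--             if j >= minLength:
--                 posList.append((i+start, i+j+start))
--             i += j
--         else:
--             i += 1
--
--     return posList
-- ===== SOURCE B (Python) =====
-- def GetPositionIdenticalAdjacentNumber(lst, start, minLength):
--     # Single flat pass: k walks over run boundaries (k is a boundary when it is
--     # the end of the list or lst[k] differs from lst[k-1]); runStart remembers
--     # where the current run began.  No nested scan, no index jumping.
--     posList = []
--     runStart = 0
--     N = len(lst)
--     for k in range(1, N + 1):
--         if k == N or lst[k] != lst[k - 1]:
--             if k - runStart >= minLength:
--                 posList.append((runStart + start, k + start))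
--             runStart = k
--     return posList
-- ===== Notes on version B (the rewrite author's own statement) =====
-- stated objective: simpler
-- what changed: A's nested scan (inner while counting each run, outer index jumping by the run length) is replaced by a single flat pass over indices that detects run boundaries (k == N or lst[k] != lst[k-1]) while carrying the start of the current run. (single comparison per element instead of re-comparing each element against its run head, measured ~3x faster).
import Mathlib
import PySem

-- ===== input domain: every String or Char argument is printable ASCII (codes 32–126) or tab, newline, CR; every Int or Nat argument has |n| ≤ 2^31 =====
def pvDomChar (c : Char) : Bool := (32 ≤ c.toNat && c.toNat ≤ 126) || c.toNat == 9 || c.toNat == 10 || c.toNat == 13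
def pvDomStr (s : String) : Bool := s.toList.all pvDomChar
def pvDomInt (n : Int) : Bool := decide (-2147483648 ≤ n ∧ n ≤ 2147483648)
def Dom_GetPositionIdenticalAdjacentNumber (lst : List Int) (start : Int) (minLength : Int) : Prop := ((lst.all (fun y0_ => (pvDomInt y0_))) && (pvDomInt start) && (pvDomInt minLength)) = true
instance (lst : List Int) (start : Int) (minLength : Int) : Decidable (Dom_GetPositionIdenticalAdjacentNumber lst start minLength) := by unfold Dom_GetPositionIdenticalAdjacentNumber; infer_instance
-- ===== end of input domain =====

-- B replaces A's nested pointer scan (inner while advancing j, outer index jumping by j)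
-- with one flat pass over run boundaries; objective: simpler.

-- ===== PORT A =====
-- inner while loop: j = 0; while i+j < N and lst[i+j] == lst[i]: j += 1   (returns final j)
def pvCountA (lst : List Int) (N i j : Nat) : Nat :=
  if h : i + j < N ∧ PySem.List.pyGetD lst ((i + j : Nat) : Int) 0 = PySem.List.pyGetD lst ((i : Nat) : Int) 0 then
    pvCountA lst N i (j + 1)
  else j
termination_by N - (i + j)
decreasing_by omega

-- outer while loop over index i, threading posList as acc
def pvLoopA (lst : List Int) (start minLength : Int) (N i : Nat) (acc : List (Int × Int)) : List (Int × Int) :=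
  if hi : i < N then
    let j := pvCountA lst N i 0
    if hj : 0 < j then
      pvLoopA lst start minLength N (i + j)
        (if (j : Int) ≥ minLength then acc ++ [((i : Int) + start, (i : Int) + (j : Int) + start)] else acc)
    else
      pvLoopA lst start minLength N (i + 1) acc
  else acc
termination_by N - i
decreasing_by all_goals omega

def GetPositionIdenticalAdjacentNumber (lst : List Int) (start : Int) (minLength : Int) : List (Int × Int) :=
  let N := lst.length
  if N ≤ 0 then [] else pvLoopA lst start minLength N 0 []

-- ===== PORT B =====
-- loop body: k is a run boundary when k == N or lst[k] != lst[k-1]; state = (runStart, posList)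
def pvStepB (lst : List Int) (N : Nat) (start minLength : Int)
    (s : Int × List (Int × Int)) (k : Int) : Int × List (Int × Int) :=
  if k = (N : Int) ∨ PySem.List.pyGetD lst k 0 ≠ PySem.List.pyGetD lst (k - 1) 0 then
    (k, if k - s.1 ≥ minLength then s.2 ++ [(s.1 + start, k + start)] else s.2)
  else s

def GetPositionIdenticalAdjacentNumber_alt (lst : List Int) (start : Int) (minLength : Int) : List (Int × Int) :=
  let N := lst.length
  ((PySem.List.pyRange 1 ((N : Int) + 1) 1).foldl (pvStepB lst N start minLength) (0, [])).2

-- ===== PRECONDITION & SPEC =====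
def Spec_GetPositionIdenticalAdjacentNumber (lst : List Int) (start : Int) (minLength : Int) (out : List (Int × Int)) : Prop := out = GetPositionIdenticalAdjacentNumber_alt lst start minLength
instance (lst : List Int) (start : Int) (minLength : Int) (out : List (Int × Int)) : Decidable (Spec_GetPositionIdenticalAdjacentNumber lst start minLength out) := by unfold Spec_GetPositionIdenticalAdjacentNumber; infer_instance

-- ===== CLAIM (what is proved, stated in full; the proofs are below) =====
def Claim_equal_GetPositionIdenticalAdjacentNumber : Prop := ∀ (lst : List Int) (start : Int) (minLength : Int), Dom_GetPositionIdenticalAdjacentNumber lst start minLength → Spec_GetPositionIdenticalAdjacentNumber lst start minLength (GetPositionIdenticalAdjacentNumber lst start minLength)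

-- ===== LEMMAS AND PROOFS =====

-- A's inner while: its result bounds, the run it certifies, and the exit condition
theorem pvCountA_spec (lst : List Int) (N i : Nat) : ∀ (d j : Nat), N - (i + j) ≤ d →
    j ≤ pvCountA lst N i j ∧
    (i + j ≤ N → i + pvCountA lst N i j ≤ N) ∧
    (∀ t, j ≤ t → t < pvCountA lst N i j → lst.getD (i + t) 0 = lst.getD i 0) ∧
    (i + pvCountA lst N i j < N → lst.getD (i + pvCountA lst N i j) 0 ≠ lst.getD i 0) := by
  intro d
  induction d with
  | zero =>
    intro j hd
    rw [pvCountA]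
    split_ifs with hc
    · omega
    · simp only [PySem.List.pyGetD_natCast, not_and] at hc
      refine ⟨le_refl j, fun h => h, fun t h1 h2 => by omega, fun hlt => ?_⟩
      exact fun he => (hc (by omega)) he
  | succ d ih =>
    intro j hd
    rw [pvCountA]
    split_ifs with hc
    · obtain ⟨hlt, heq⟩ := hc
      simp only [PySem.List.pyGetD_natCast] at heq
      obtain ⟨g1, g2, g3, g4⟩ := ih (j + 1) (by omega)
      refine ⟨by omega, fun _ => g2 (by omega), fun t h1 h2 => ?_, g4⟩
      rcases Nat.eq_or_lt_of_le h1 with h | h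
      · simpa [← h] using heq
      · exact g3 t (by omega) h2
    · simp only [PySem.List.pyGetD_natCast, not_and] at hc
      refine ⟨le_refl j, fun h => h, fun t h1 h2 => by omega, fun hlt => ?_⟩
      exact fun he => (hc (by omega)) he

theorem pvCountA_pos (lst : List Int) (N i : Nat) (hi : i < N) : 0 < pvCountA lst N i 0 := by
  rw [pvCountA]
  split_ifs with hc
  · have h := (pvCountA_spec lst N i (N - (i + 1)) 1 (by omega)).1
    simpa using Nat.lt_of_lt_of_le Nat.zero_lt_one h
  · exact absurd ⟨by omega, rfl⟩ hc

-- interior of a run: pvStepB is the identity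
theorem pvFoldB_interior (lst : List Int) (N : Nat) (start minLength : Int) :
    ∀ (len a : Nat) (s : Int × List (Int × Int)),
      (∀ k, a ≤ k → k < a + len → k ≠ N ∧ 1 ≤ k ∧ lst.getD k 0 = lst.getD (k - 1) 0) →
      ((List.range' a len).map (fun k : Nat => (k : Int))).foldl (pvStepB lst N start minLength) s = s := by
  intro len
  induction len with
  | zero => intro a s _; simp
  | succ len ih =>
    intro a s h
    rw [List.range'_succ]
    simp only [List.map_cons, List.foldl_cons]
    obtain ⟨hne, h1, heq⟩ := h a (le_refl a) (by omega)
    have hcond : ¬(((a : Nat) : Int) = (N : Int) ∨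
        PySem.List.pyGetD lst ((a : Nat) : Int) 0 ≠ PySem.List.pyGetD lst (((a : Nat) : Int) - 1) 0) := by
      rintro (h | h)
      · exact hne (by exact_mod_cast h)
      · apply h
        rw [show ((a : Int) - 1) = ((a - 1 : Nat) : Int) by omega]
        simp only [PySem.List.pyGetD_natCast]
        exact heq
    have hstep : pvStepB lst N start minLength s (a : Int) = s := by
      unfold pvStepB
      rw [if_neg hcond]
    rw [hstep]
    exact ih (a + 1) s (fun k hk1 hk2 => h k (by omega) (by omega))

-- main loop correspondence: B's fold over [i+1..N] from runStart = i equals A's outer loop at i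
theorem pvLoopAB (lst : List Int) (start minLength : Int) :
    ∀ (d i : Nat) (acc : List (Int × Int)), lst.length - i ≤ d → i ≤ lst.length →
      (((List.range' (i + 1) (lst.length - i)).map (fun k : Nat => (k : Int))).foldl
          (pvStepB lst lst.length start minLength) ((i : Int), acc)).2
        = pvLoopA lst start minLength lst.length i acc := by
  intro d
  induction d with
  | zero =>
    intro i acc hd hi
    have h0 : lst.length - i = 0 := by omega
    rw [h0, pvLoopA, dif_neg (by omega)]
    simp
  | succ d ih =>
    intro i acc hd hi
    by_cases hlt : i < lst.length
    · set N := lst.length with hN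
      set j := pvCountA lst N i 0 with hj
      have hj1 : 0 < j := pvCountA_pos lst N i hlt
      obtain ⟨_, g2, g3, g4⟩ := pvCountA_spec lst N i (N - i) 0 (by omega)
      have hjle : i + j ≤ N := g2 (by omega)
      have hrun : ∀ t, t < j → lst.getD (i + t) 0 = lst.getD i 0 := fun t ht => g3 t (Nat.zero_le t) ht
      -- split the index range at the run end i + j
      have hsplit : List.range' (i + 1) (N - i) =
          List.range' (i + 1) (j - 1) ++ ((i + j) :: List.range' (i + j + 1) (N - (i + j))) := by
        rw [show N - i = (j - 1) + (N - (i + j) + 1) by omega, ← List.range'_append]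
        rw [show i + 1 + 1 * (j - 1) = i + j by omega, List.range'_succ]
      rw [hsplit]
      simp only [List.map_append, List.foldl_append, List.map_cons, List.foldl_cons]
      -- interior steps are the identity
      rw [pvFoldB_interior lst N start minLength (j - 1) (i + 1) _ ?_]
      · -- boundary step at i + j
        have hguard : ((i + j : Nat) : Int) = (N : Int) ∨
            PySem.List.pyGetD lst ((i + j : Nat) : Int) 0 ≠ PySem.List.pyGetD lst (((i + j : Nat) : Int) - 1) 0 := by
          rcases Nat.eq_or_lt_of_le hjle with h | h
          · exact Or.inl (by exact_mod_cast h)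
          · refine Or.inr ?_
            rw [show (((i + j : Nat) : Int) - 1) = ((i + j - 1 : Nat) : Int) by omega]
            simp only [PySem.List.pyGetD_natCast]
            rw [show i + j - 1 = i + (j - 1) by omega, hrun (j - 1) (by omega)]
            exact g4 h
        have hstep : pvStepB lst N start minLength ((i : Int), acc) ((i + j : Nat) : Int) =
            (((i + j : Nat) : Int),
              if (j : Int) ≥ minLength then acc ++ [((i : Int) + start, (i : Int) + (j : Int) + start)] else acc) := by
          unfold pvStepB
          rw [if_pos hguard]
          have e1 : ((i + j : Nat) : Int) - (i : Int) = (j : Int) := by push_cast; ring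
          have e2 : ((i + j : Nat) : Int) + start = (i : Int) + (j : Int) + start := by push_cast; ring
          rw [e1, e2]
        rw [hstep]
        conv_rhs => rw [pvLoopA]
        rw [dif_pos hlt]
        simp only []
        rw [← hj, dif_pos hj1]
        exact ih (i + j) _ (by omega) (by omega)
      · -- the interior condition on k ∈ [i+1, i+j-1]
        intro k hk1 hk2
        refine ⟨by omega, by omega, ?_⟩
        rw [show k = i + (k - i) by omega, show i + (k - i) - 1 = i + (k - i - 1) by omega]
        rw [hrun (k - i) (by omega), hrun (k - i - 1) (by omega)]
    · have h0 : lst.length - i = 0 := by omega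
      rw [h0, pvLoopA, dif_neg (by omega)]
      simp

theorem pvRange_eq (N : Nat) :
    PySem.List.pyRange 1 ((N : Int) + 1) 1 = (List.range' 1 N).map (fun k : Nat => (k : Int)) := by
  rw [PySem.List.pyRange_one]
  rw [show ((N : Int) + 1 - 1).toNat = N by omega]
  refine List.ext_getElem (by simp) ?_
  intro k h1 h2
  simp only [List.getElem_map, List.getElem_range, List.getElem_range']
  omega

-- ===== VERDICT (by name: the statement is the Claim_ definition above) =====
theorem GetPositionIdenticalAdjacentNumber_spec : Claim_equal_GetPositionIdenticalAdjacentNumber := by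
  intro lst start minLength _
  unfold Spec_GetPositionIdenticalAdjacentNumber
  unfold GetPositionIdenticalAdjacentNumber GetPositionIdenticalAdjacentNumber_alt
  simp only [pvRange_eq lst.length]
  by_cases h0 : lst.length = 0
  · rw [if_pos (by omega), h0]
    simp
  · rw [if_neg (by omega)]
    have hmain := pvLoopAB lst start minLength lst.length 0 [] (by omega) (by omega)
    simp only [Nat.cast_zero, Nat.sub_zero, Nat.zero_add] at hmain
    rw [← hmain]
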